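-- pv_equiv track=rewrite | github.com/ajbaldini/code_practice | string_questions/print_dupes_from_string.py | print_dupes
-- ===== SOURCE A (Python) =====
-- def print_dupes(test_str):
--     checked_chs = []
--     dupes = []
--     for c in test_str:
--         if c in checked_chs:
--             dupes.append(c)
--         checked_chs.append(c)
--     return dupes
-- ===== SOURCE B (Python) =====
-- def print_dupes(test_str):
--     first = {}
--     for i, c in enumerate(test_str):
--         if c not in first:
--             first[c] = i
--     return [c for i, c in enumerate(test_str) if first[c] != i]
-- ===== Notes on version B (the rewrite author's own statement) =====
-- stated objective: faster
-- what changed: Replaces the left-to-right scan with a membership test against an ever-growing list of all previous characters by a two-pass scheme: one pass records each character's first-occurrence index in a dict, a comprehension then keeps every occurrence whose index differs from that first index.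
import Mathlib
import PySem

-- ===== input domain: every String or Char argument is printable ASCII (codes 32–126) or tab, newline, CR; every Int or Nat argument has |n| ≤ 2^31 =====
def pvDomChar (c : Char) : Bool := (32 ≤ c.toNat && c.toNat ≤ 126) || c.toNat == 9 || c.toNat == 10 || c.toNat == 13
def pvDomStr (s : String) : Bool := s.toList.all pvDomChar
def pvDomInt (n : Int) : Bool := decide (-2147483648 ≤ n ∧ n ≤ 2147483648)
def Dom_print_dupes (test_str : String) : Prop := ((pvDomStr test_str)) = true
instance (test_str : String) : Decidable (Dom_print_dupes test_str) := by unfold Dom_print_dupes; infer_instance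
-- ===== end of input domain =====

-- B replaces A's quadratic seen-list membership scan by a first-occurrence-index dict built in one
-- pass plus a filtering pass (asymptotically faster); return values proved equal on all inputs.

-- ===== PORT A =====
def print_dupes (test_str : String) : List String :=
  (test_str.toList.foldl
    (fun (st : List Char × List String) c =>
      (st.1 ++ [c], if st.1.contains c then st.2 ++ [String.ofList [c]] else st.2))
    ([], [])).2

-- ===== PORT B =====
-- first[c] in Source B always hits (every character of the string is a key by then); the getD
-- default ic.1 is therefore never consulted.
def print_dupes_alt (test_str : String) : List String :=
  let l := test_str.toList
  let first := (PySem.List.enumerate l).foldl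
    (fun (d : PySem.Dict Char Int) ic => if d.contains ic.2 then d else d.insert ic.2 ic.1)
    PySem.Dict.empty
  (PySem.List.enumerate l).foldl
    (fun acc ic => if first.getD ic.2 ic.1 ≠ ic.1 then acc ++ [String.ofList [ic.2]] else acc) []

-- ===== PRECONDITION & SPEC =====
def Spec_print_dupes (test_str : String) (out : List String) : Prop := out = print_dupes_alt test_str
instance (test_str : String) (out : List String) : Decidable (Spec_print_dupes test_str out) := by unfold Spec_print_dupes; infer_instance

-- ===== CLAIM (what is proved, stated in full; the proofs are below) =====
def Claim_equal_print_dupes : Prop := ∀ (test_str : String), Dom_print_dupes test_str → Spec_print_dupes test_str (print_dupes test_str)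

-- ===== LEMMAS AND PROOFS =====

/-- Reference recursion: dupes of `t` given the already-seen prefix `pre`. -/
def dspec : List Char → List Char → List String
  | _, [] => []
  | pre, c :: t => (if pre.contains c then [String.ofList [c]] else []) ++ dspec (pre ++ [c]) t

/-- A's fold computes `dspec`. -/
theorem portA_eq_dspec (t pre : List Char) (dupes : List String) :
    (t.foldl
      (fun (st : List Char × List String) c =>
        (st.1 ++ [c], if st.1.contains c then st.2 ++ [String.ofList [c]] else st.2))
      (pre, dupes)).2 = dupes ++ dspec pre t := by
  induction t generalizing pre dupes with
  | nil => simp [dspec]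
  | cons c t ih =>
    simp only [List.foldl_cons, dspec, ih]
    by_cases h : c ∈ pre <;> simp [h]

/-- The first-occurrence dict lookup equals a `find?` over the remaining pairs. -/
theorem dict_get?_eq_find? (ps : List (Int × Char)) (d : PySem.Dict Char Int) (c : Char) :
    ((ps.foldl
        (fun (d : PySem.Dict Char Int) ic => if d.contains ic.2 then d else d.insert ic.2 ic.1)
        d).get? c)
      = (d.get? c).or ((ps.find? (fun p => p.2 == c)).map (·.1)) := by
  induction ps generalizing d with
  | nil => simp
  | cons p ps ih =>
    simp only [List.foldl_cons, List.find?_cons]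
    by_cases h : d.contains p.2 = true
    · rw [if_pos h, ih]
      by_cases hc : (p.2 == c) = true
      · have hs : (d.get? c).isSome := by
          rw [show c = p.2 from (beq_iff_eq.mp hc).symm, ← PySem.Dict.contains_eq_isSome_get?]
          exact h
        simp [hc, Option.or_of_isSome hs]
      · simp [hc]
    · rw [if_neg h, ih]
      by_cases hc : p.2 = c
      · subst hc
        have hn : d.get? p.2 = none := by
          rw [PySem.Dict.contains_eq_isSome_get?] at h
          simpa using h
        simp [hn, PySem.Dict.get?_insert_self]
      · have hbe : (p.2 == c) = false := by simp [hc]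
        have hne : c ≠ p.2 := fun he => hc he.symm
        rw [PySem.Dict.get?_insert_of_ne _ _ hne]
        simp [hbe]

/-- On the whole string `pre ++ c :: t`, the dict condition at index `pre.length`
    holds exactly when `c` occurred in `pre`. -/
theorem dict_cond (pre t : List Char) (c : Char) :
    (((PySem.List.enumerate (pre ++ c :: t)).foldl
        (fun (d : PySem.Dict Char Int) ic => if d.contains ic.2 then d else d.insert ic.2 ic.1)
        PySem.Dict.empty).getD c (pre.length : Int) ≠ (pre.length : Int))
      ↔ pre.contains c = true := by
  rw [PySem.Dict.getD_eq_get?_getD, dict_get?_eq_find?]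
  rw [show PySem.List.enumerate (pre ++ c :: t) 0
        = PySem.List.enumerate pre 0 ++ PySem.List.enumerate (c :: t) (0 + pre.length)
      from PySem.List.enumerate_append ..]
  rw [List.find?_append]
  by_cases hm : c ∈ pre
  · have hsome : ((PySem.List.enumerate pre 0).find? (fun p => p.2 == c)).isSome := by
      obtain ⟨k, hk, hget⟩ := List.getElem_of_mem hm
      rw [List.find?_isSome]
      exact ⟨((k : Int), c), by
        refine ⟨(PySem.List.mem_enumerate_iff ..).2 ⟨k, hk, by simp [hget]⟩, by simp⟩⟩
    obtain ⟨p, hp⟩ := Option.isSome_iff_exists.mp hsome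
    have hmem := List.mem_of_find?_eq_some hp
    obtain ⟨k, hk, hpk⟩ := (PySem.List.mem_enumerate_iff ..).1 hmem
    have hlt : (p.1 : Int) < (pre.length : Int) := by
      rw [hpk]; push_cast; omega
    have hfst : ∃ j : Int, p = (j, c) ∧ j < (pre.length : Int) := by
      have hpred := List.find?_some hp
      refine ⟨p.1, ?_, hlt⟩
      have : p.2 = c := by simpa using hpred
      exact Prod.ext rfl this
    obtain ⟨j, hpj, hj⟩ := hfst
    subst hpj
    simp only [hp, Option.some_or, PySem.Dict.get?_empty, Option.none_or,
      Option.map_some, Option.getD_some]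
    constructor
    · intro _; exact List.contains_iff_mem.mpr hm
    · intro _; exact ne_of_lt hj
  · have hnone : (PySem.List.enumerate pre 0).find? (fun p => p.2 == c) = none := by
      rw [List.find?_eq_none]
      intro p hp
      obtain ⟨k, hk, hpk⟩ := (PySem.List.mem_enumerate_iff ..).1 hp
      simp only [hpk, beq_iff_eq]
      intro he; exact hm (he ▸ List.getElem_mem hk)
    rw [hnone]
    rw [show PySem.List.enumerate (c :: t) (0 + pre.length)
          = ((0 : Int) + pre.length, c) :: PySem.List.enumerate t (0 + pre.length + 1)
        from PySem.List.enumerate_cons ..]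
    simp [hm]

/-- B's second fold computes `dspec` on each suffix. -/
theorem portB_fold_eq_dspec (t pre : List Char) (acc : List String) :
    (PySem.List.enumerate t (pre.length : Int)).foldl
      (fun acc ic =>
        if ((PySem.List.enumerate (pre ++ t)).foldl
              (fun (d : PySem.Dict Char Int) ic =>
                if d.contains ic.2 then d else d.insert ic.2 ic.1)
              PySem.Dict.empty).getD ic.2 ic.1 ≠ ic.1
        then acc ++ [String.ofList [ic.2]] else acc) acc
      = acc ++ dspec pre t := by
  induction t generalizing pre acc with
  | nil => simp [dspec]
  | cons c t ih =>
    rw [show PySem.List.enumerate (c :: t) (pre.length : Int)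
          = ((pre.length : Int), c) :: PySem.List.enumerate t ((pre.length : Int) + 1)
        from PySem.List.enumerate_cons ..]
    simp only [List.foldl_cons, dspec]
    have hlen : ((pre ++ [c]).length : Int) = (pre.length : Int) + 1 := by simp
    have hfix : pre ++ c :: t = (pre ++ [c]) ++ t := by simp
    by_cases hm : c ∈ pre
    · have h : pre.contains c = true := List.contains_iff_mem.mpr hm
      rw [if_pos ((dict_cond pre t c).2 h)]
      rw [show ((pre.length : Int) + 1) = ((pre ++ [c]).length : Int) from hlen.symm, hfix]
      rw [ih (pre ++ [c]) (acc ++ [String.ofList [c]])]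
      simp [hm]
    · have h : ¬ pre.contains c = true := fun hc => hm (List.contains_iff_mem.mp hc)
      rw [if_neg (fun hc => h ((dict_cond pre t c).1 hc))]
      rw [show ((pre.length : Int) + 1) = ((pre ++ [c]).length : Int) from hlen.symm, hfix]
      rw [ih (pre ++ [c]) acc]
      simp [hm]

-- ===== VERDICT (by name: the statement is the Claim_ definition above) =====
theorem print_dupes_spec : Claim_equal_print_dupes := by
  intro s _
  show print_dupes s = print_dupes_alt s
  unfold print_dupes print_dupes_alt
  rw [portA_eq_dspec s.toList [] []]
  have := portB_fold_eq_dspec s.toList [] []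
  simp only [List.nil_append, List.length_nil, Nat.cast_zero] at this
  exact this.symm
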